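-- pv_equiv track=rewrite | github.com/ChrisMBrooks/KIR_HLA | Scripts/General/remove_correlates.py | remove_correlates
-- ===== SOURCE A (Python) =====
-- def remove_correlates(corr_dict:dict):
--     keys_to_check = list(corr_dict.keys())
--     uniques = []
--
--     while len(keys_to_check) > 0:
--         current_key = keys_to_check[-1]
--         current_correlates = corr_dict[current_key]
--         uniques.append(current_key)
--
--         items_to_remove = [current_key] + current_correlates
--         for item in items_to_remove:
--             if item in keys_to_check:
--                 keys_to_check.remove(item)
--
--     return uniques
-- ===== SOURCE B (Python) =====
-- def remove_correlates(corr_dict: dict):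
--     # Single reverse pass with a 'removed' hash set instead of repeated
--     # list membership tests and list.remove calls.
--     removed = set()
--     uniques = []
--     for key in reversed(list(corr_dict.keys())):
--         if key in removed:
--             continue
--         uniques.append(key)
--         removed.add(key)
--         removed.update(corr_dict[key])
--     return uniques
-- ===== Notes on version B (the rewrite author's own statement) =====
-- stated objective: faster
-- what changed: Replaces the while-loop that repeatedly scans and mutates the key list (membership test plus list.remove for every correlate) with a single reverse pass over the keys maintaining a hash set of removed items.
import Mathlib
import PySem

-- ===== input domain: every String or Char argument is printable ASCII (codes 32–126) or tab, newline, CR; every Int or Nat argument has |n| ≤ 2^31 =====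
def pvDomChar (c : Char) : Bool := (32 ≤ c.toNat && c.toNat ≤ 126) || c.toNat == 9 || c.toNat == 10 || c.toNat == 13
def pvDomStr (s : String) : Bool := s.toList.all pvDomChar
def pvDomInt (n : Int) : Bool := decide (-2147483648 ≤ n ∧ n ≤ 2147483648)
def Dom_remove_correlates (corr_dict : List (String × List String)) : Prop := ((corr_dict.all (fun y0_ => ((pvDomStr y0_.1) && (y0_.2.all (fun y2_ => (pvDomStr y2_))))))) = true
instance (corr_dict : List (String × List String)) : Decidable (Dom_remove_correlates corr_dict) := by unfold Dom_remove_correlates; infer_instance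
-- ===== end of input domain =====

-- B replaces A's repeated list scans and list.remove calls by one reverse pass over the
-- keys with a hash set of removed items (asymptotically faster; measured by the check).

-- ===== PORT A =====
-- one step of A's inner loop: 'if item in keys_to_check: keys_to_check.remove(item)'
def rcStep (l : List String) (item : String) : List String :=
  if l.contains item then (PySem.List.remove? l item).getD l else l
  -- remove? is guarded by the membership test, so the .getD default is never taken

-- A's inner 'for item in items_to_remove' loop
def rcRemoveItems (l : List String) (items : List String) : List String :=
  items.foldl rcStep l

-- the next three lemmas are cited by rcLoop's decreasing_by (termination of A's while loop)
theorem rcStep_cons (a : String) (t : List String) (item : String) :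
    rcStep (a :: t) item = if a == item then t else a :: rcStep t item := by
  by_cases hai : a = item
  · subst hai; simp [rcStep, PySem.List.remove?, List.idxOf?_cons]
  · have hb : (a == item) = false := by simp [hai]
    have hna : ¬ item = a := fun e => hai e.symm
    by_cases hm : t.contains item = true
    · have hmem : item ∈ t := List.contains_iff_mem.mp hm
      obtain ⟨i, hi⟩ : ∃ i, List.idxOf? item t = some i :=
        Option.isSome_iff_exists.mp ((List.isSome_idxOf? (l := t) (a := item)).mpr hmem)
      simp [rcStep, PySem.List.remove?, List.idxOf?_cons, hb, hi, List.eraseIdx_cons_succ, hmem, hna]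
    · have hnm : item ∉ t := fun e => hm (List.contains_iff_mem.mpr e)
      simp [rcStep, hb, hnm, hna]

theorem rcStep_erase (l : List String) (item : String) : rcStep l item = l.erase item := by
  induction l with
  | nil => simp [rcStep]
  | cons a t ih => rw [rcStep_cons, List.erase_cons]; by_cases h : a = item <;> simp [h, ih]

theorem rcRemoveItems_length_le (items : List String) (l : List String) :
    (rcRemoveItems l items).length ≤ l.length := by
  induction items generalizing l with
  | nil => simp [rcRemoveItems]
  | cons i rest ih =>
    have h1 : rcRemoveItems l (i :: rest) = rcRemoveItems (rcStep l i) rest := rfl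
    calc (rcRemoveItems l (i :: rest)).length = (rcRemoveItems (rcStep l i) rest).length := by rw [h1]
      _ ≤ (rcStep l i).length := ih _
      _ ≤ l.length := by rw [rcStep_erase]; exact List.length_erase_le

theorem rcRemoveItems_cons_length_lt (l : List String) (k : String) (items : List String)
    (h : k ∈ l) : (rcRemoveItems l (k :: items)).length < l.length := by
  have h1 : rcRemoveItems l (k :: items) = rcRemoveItems (rcStep l k) items := rfl
  have h2 : (rcStep l k).length < l.length := by
    rw [rcStep_erase]
    have := List.length_erase_of_mem h
    have : 0 < l.length := List.length_pos_of_mem h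
    omega
  calc (rcRemoveItems l (k :: items)).length ≤ (rcStep l k).length := by
        rw [h1]; exact rcRemoveItems_length_le items _
    _ < l.length := h2

-- A's 'while len(keys_to_check) > 0' loop
def rcLoop (d : PySem.Dict String (List String)) (keys : List String) (uniques : List String) :
    List String :=
  if h : keys = [] then uniques
  else
    let current := keys.getLast h
    -- corr_dict[current_key]: current always comes from d.keys, so the KeyError branch is unreachable
    let corr := d.getD current []
    rcLoop d (rcRemoveItems keys (current :: corr)) (uniques ++ [current])
termination_by keys.length
decreasing_by exact rcRemoveItems_cons_length_lt keys _ _ (keys.getLast_mem h)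

def remove_correlates (corr_dict : List (String × List String)) : List String :=
  rcLoop (PySem.Dict.ofList corr_dict) (PySem.Dict.ofList corr_dict).keys []

-- ===== PORT B =====
-- B's loop body: skip already-removed keys, else emit the key and mark it and its correlates removed
def rcAltStep (d : PySem.Dict String (List String))
    (st : PySem.Set String × List String) (key : String) : PySem.Set String × List String :=
  if PySem.Set.contains st.1 key then st
  else (PySem.Set.update (PySem.Set.add st.1 key) (d.getD key []), st.2 ++ [key])

def remove_correlates_alt (corr_dict : List (String × List String)) : List String :=
  let d := PySem.Dict.ofList corr_dict
  (d.keys.reverse.foldl (rcAltStep d) (PySem.Set.empty, [])).2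

-- ===== PRECONDITION & SPEC =====
def Spec_remove_correlates (corr_dict : List (String × List String)) (out : List String) : Prop := out = remove_correlates_alt corr_dict
instance (corr_dict : List (String × List String)) (out : List String) : Decidable (Spec_remove_correlates corr_dict out) := by unfold Spec_remove_correlates; infer_instance

-- ===== CLAIM (what is proved, stated in full; the proofs are below) =====
def Claim_equal_remove_correlates : Prop := ∀ (corr_dict : List (String × List String)), Dom_remove_correlates corr_dict → Spec_remove_correlates corr_dict (remove_correlates corr_dict)

-- ===== LEMMAS AND PROOFS =====

-- on a duplicate-free list A's guarded remove loop is a filter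
theorem rcRemoveItems_eq_filter (items : List String) (l : List String) (hnd : l.Nodup) :
    rcRemoveItems l items = l.filter (fun x => !items.contains x) := by
  induction items generalizing l with
  | nil => simp [rcRemoveItems]
  | cons i rest ih =>
    have h1 : rcRemoveItems l (i :: rest) = rcRemoveItems (l.erase i) rest := by
      show rcRemoveItems (rcStep l i) rest = _
      rw [rcStep_erase]
    rw [h1, ih _ (hnd.erase i), List.Nodup.erase_eq_filter hnd i, List.filter_filter]
    apply List.filter_congr
    intro x _
    by_cases h2 : x = i <;> simp [h2]

-- core invariant: A's while loop over the not-yet-removed keys equals B's reverse fold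
theorem rcLoop_eq_foldl (d : PySem.Dict String (List String)) :
    ∀ (r : List String), r.Nodup → ∀ (rs : PySem.Set String) (u : List String),
      rcLoop d (r.reverse.filter (fun x => !rs.contains x)) u
        = (r.foldl (rcAltStep d) (rs, u)).2 := by
  intro r
  induction r with
  | nil => intro _ rs u; simp [rcLoop]
  | cons k t ih =>
    intro hnd rs u
    have hk : k ∉ t := (List.nodup_cons.mp hnd).1
    have hndt : t.Nodup := (List.nodup_cons.mp hnd).2
    rw [List.reverse_cons, List.filter_append, List.foldl_cons]
    by_cases hmem : k ∈ rs
    · have h1 : List.filter (fun x => !rs.contains x) [k] = [] := by simp [hmem]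
      have h2 : rcAltStep d (rs, u) k = (rs, u) := by
        simp [rcAltStep, PySem.Set.contains, hmem]
      rw [h1, List.append_nil, h2, ih hndt rs u]
    · have h1 : List.filter (fun x => !rs.contains x) [k] = [k] := by simp [hmem]
      rw [h1]
      have h2 : rcAltStep d (rs, u) k
          = (PySem.Set.update (PySem.Set.add rs k) (d.getD k []), u ++ [k]) := by
        simp [rcAltStep, PySem.Set.contains, hmem]
      have hne : t.reverse.filter (fun x => !rs.contains x) ++ [k] ≠ [] := by simp
      have hlast : (t.reverse.filter (fun x => !rs.contains x) ++ [k]).getLast hne = k :=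
        List.getLast_concat
      have hL : (t.reverse.filter (fun x => !rs.contains x) ++ [k]).Nodup := by
        refine List.Nodup.append ?_ (List.nodup_singleton k) ?_
        · exact (List.nodup_reverse.mpr hndt).filter _
        · intro x hx hy
          simp only [List.mem_singleton] at hy
          subst hy
          exact hk (List.mem_reverse.mp (List.mem_of_mem_filter hx))
      have hq : List.filter (fun x => !(k :: d.getD k []).contains x) [k] = [] := by simp
      have hp : (fun a => !(k :: d.getD k []).contains a && !rs.contains a)
          = (fun x => !(PySem.Set.update (PySem.Set.add rs k) (d.getD k [])).contains x) := by
        funext x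
        by_cases hx1 : x ∈ rs <;> by_cases hx2 : x = k <;> by_cases hx3 : x ∈ d.getD k [] <;>
          simp [hx1, hx2, hx3, PySem.Set.mem_update, PySem.Set.mem_add]
      rw [rcLoop]
      simp only [hne, dite_eq_ite, if_false, hlast]
      rw [rcRemoveItems_eq_filter _ _ hL, List.filter_append, List.filter_filter, hq,
        List.append_nil, hp, h2, ih hndt _ (u ++ [k])]

-- ===== VERDICT (by name: the statement is the Claim_ definition above) =====
theorem remove_correlates_spec : Claim_equal_remove_correlates := by
  intro corr_dict _
  show remove_correlates corr_dict = remove_correlates_alt corr_dict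
  unfold remove_correlates remove_correlates_alt
  set d := PySem.Dict.ofList corr_dict with hd
  have hnd : d.keys.Nodup := PySem.Dict.nodup_keys_ofList corr_dict
  have := rcLoop_eq_foldl d d.keys.reverse (List.nodup_reverse.mpr hnd) PySem.Set.empty []
  simpa [PySem.Set.empty] using this
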